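-- pv_equiv track=rewrite | github.com/microsoft/WikiCommentEdit | wiki_util.py | extractDiffContext
-- ===== SOURCE A (Python) =====
-- def calTokenSize(sents):
--     return sum([len(sent) for sent in sents])
--
-- def isSameSent(origin_sent, target_sent):
--
--     origin_size = len(origin_sent)
--     target_size = len(target_sent)
--
--     if origin_size != target_size:
--         return False
--
--     for i in range(origin_size):
--         if origin_sent[i] != target_sent[i]:
--             return False
--     return True
--
-- def stripContext(origin_sents, target_sents, max_token_size=200):
--
--     start_match = True
--     end_match = True
--     origin_token_size = calTokenSize(origin_sents)
--     target_token_size = calTokenSize(target_sents)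
--     diff_offset = 0
--     while origin_token_size > max_token_size or target_token_size > max_token_size:
--
--         if len(origin_sents) == 0 or len(target_sents) == 0:
--                 break
--
--         if start_match and isSameSent(origin_sents[0], target_sents[0]):
--             # remove the sentence from both origin and target
--             sent_size = len(origin_sents[0])
--             origin_sents = origin_sents[1:]
--             target_sents = target_sents[1:]
--             diff_offset += sent_size
--             origin_token_size -= sent_size
--             target_token_size -= sent_size
--         else:
--             start_match = False
--
--         if len(origin_sents) == 0 or len(target_sents) == 0:
--             break
--
--         if end_match and isSameSent(origin_sents[-1], target_sents[-1]):
--             sent_size = len(origin_sents[-1])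
--             origin_sents = origin_sents[:-1]
--             target_sents = target_sents[:-1]
--             origin_token_size -= sent_size
--             target_token_size -= sent_size
--         else:
--             end_match = False
--
--         if not start_match and not end_match:
--             break
--
--     if origin_token_size > max_token_size or target_token_size > max_token_size:
--         origin_sents, target_sents = None, None
--
--     return origin_sents, target_sents, diff_offset
--
-- def extractDiffContext(origin_sents, target_sents, origin_diff, target_diff, max_tokens=200):
--
--     origin_context, target_context, diff_offset = stripContext(origin_sents, target_sents)
--     if origin_context != None and target_context != None:
--         origin_diff = [i - diff_offset for i in origin_diff]
--         target_diff = [i - diff_offset for i in target_diff]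
--
--         # fix the issue in the case that the appended dot belonging to current sentence is marked as the previous sentence. See example:
--         # + .
--         # + Warren
--         # + ,
--         # ...
--         # + -
--         # + syndicalists
--         #   .
--         if len(target_diff) > 0 and target_diff[0] == -1:
--             target_diff = target_diff[1:]
--
--     return origin_context, target_context, origin_diff, target_diff
-- ===== SOURCE B (Python) =====
-- def extractDiffContext(origin_sents, target_sents, origin_diff, target_diff, max_tokens=200):
--     # Two-pointer version: track front/back trim counts and slice once at the end,
--     # instead of re-slicing both lists on every iteration of the strip loop.
--     # Like A, the stripping budget is the fixed 200 (A calls stripContext with its default).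
--     BUDGET = 200
--     n, m = len(origin_sents), len(target_sents)
--     o_size = sum(len(s) for s in origin_sents)
--     t_size = sum(len(s) for s in target_sents)
--     f = b = 0
--     diff_offset = 0
--     start_match = end_match = True
--     while o_size > BUDGET or t_size > BUDGET:
--         if f >= n - b or f >= m - b:
--             break
--         if start_match and origin_sents[f] == target_sents[f]:
--             sz = len(origin_sents[f])
--             f += 1
--             diff_offset += sz
--             o_size -= sz
--             t_size -= sz
--         else:
--             start_match = False
--         if f >= n - b or f >= m - b:
--             break
--         if end_match and origin_sents[n - 1 - b] == target_sents[m - 1 - b]: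
--             sz = len(origin_sents[n - 1 - b])
--             b += 1
--             o_size -= sz
--             t_size -= sz
--         else:
--             end_match = False
--         if not start_match and not end_match:
--             break
--     if o_size > BUDGET or t_size > BUDGET:
--         return None, None, origin_diff, target_diff
--     origin_diff = [i - diff_offset for i in origin_diff]
--     target_diff = [i - diff_offset for i in target_diff]
--     if target_diff and target_diff[0] == -1:
--         target_diff = target_diff[1:]
--     return origin_sents[f:n - b], target_sents[f:m - b], origin_diff, target_diff
-- ===== Notes on version B (the rewrite author's own statement) =====
-- stated objective: alternative
-- what changed: B replaces A's repeated list re-slicing and re-comparison inside the strip loop with two trim counters (front/back) over the original lists, element-index comparisons, and a single final slice; the diff-offset adjustment is applied directly at the end.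
import Mathlib
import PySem

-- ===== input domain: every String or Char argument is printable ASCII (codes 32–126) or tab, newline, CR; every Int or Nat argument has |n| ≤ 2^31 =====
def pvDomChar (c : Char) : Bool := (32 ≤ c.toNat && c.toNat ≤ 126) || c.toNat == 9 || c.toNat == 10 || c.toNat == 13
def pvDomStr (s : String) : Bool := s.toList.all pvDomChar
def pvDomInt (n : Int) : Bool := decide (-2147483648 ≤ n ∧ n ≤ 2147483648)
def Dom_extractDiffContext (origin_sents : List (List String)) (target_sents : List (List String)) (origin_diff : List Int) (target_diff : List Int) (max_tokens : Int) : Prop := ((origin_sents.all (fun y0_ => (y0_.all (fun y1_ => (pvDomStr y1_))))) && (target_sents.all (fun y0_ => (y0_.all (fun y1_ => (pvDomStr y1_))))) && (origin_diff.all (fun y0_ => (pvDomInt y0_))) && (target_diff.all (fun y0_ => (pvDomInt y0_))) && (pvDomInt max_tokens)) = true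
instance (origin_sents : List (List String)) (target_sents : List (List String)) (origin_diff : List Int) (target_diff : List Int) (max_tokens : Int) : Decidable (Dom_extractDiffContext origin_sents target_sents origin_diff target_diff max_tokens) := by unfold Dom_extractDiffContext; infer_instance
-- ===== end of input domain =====

-- B replaces A's per-iteration list re-slicing with two trim counters over the original lists and one final slice (alternative structure, same values).

-- ===== PORT A =====
def calTokenSize (sents : List (List String)) : Int :=
  (sents.map (fun sent => (sent.length : Int))).sum

def isSameSent (origin_sent target_sent : List String) : Bool :=
  if origin_sent.length ≠ target_sent.length then false
  else (List.range origin_sent.length).all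
    (fun i => origin_sent.getD i "" == target_sent.getD i "")

-- the while loop of stripContext; fuel = origin_sents.length + 1 suffices (each
-- recursive call strictly shrinks origin_sents, and an empty list breaks the loop)
def stripLoopA : Nat → List (List String) → List (List String) → Bool → Bool → Int → Int → Int → Int →
    List (List String) × List (List String) × Int × Int × Int
  | 0, o, t, _, _, osz, tsz, doff, _ => (o, t, osz, tsz, doff)
  | fuel + 1, o, t, sm, em, osz, tsz, doff, mx =>
    if osz > mx ∨ tsz > mx then
      if o.length = 0 ∨ t.length = 0 then (o, t, osz, tsz, doff)
      else
        match (if sm && isSameSent (o.headD []) (t.headD []) then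
                 let sz : Int := ((o.headD []).length : Int)
                 (o.drop 1, t.drop 1, sm, osz - sz, tsz - sz, doff + sz)
               else (o, t, false, osz, tsz, doff)) with
        | (o1, t1, sm1, osz1, tsz1, doff1) =>
          if o1.length = 0 ∨ t1.length = 0 then (o1, t1, osz1, tsz1, doff1)
          else
            match (if em && isSameSent (o1.getLastD []) (t1.getLastD []) then
                     let sz : Int := ((o1.getLastD []).length : Int)
                     (o1.dropLast, t1.dropLast, em, osz1 - sz, tsz1 - sz)
                   else (o1, t1, false, osz1, tsz1)) with
          | (o2, t2, em2, osz2, tsz2) =>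
            if sm1 = false ∧ em2 = false then (o2, t2, osz2, tsz2, doff1)
            else stripLoopA fuel o2 t2 sm1 em2 osz2 tsz2 doff1 mx
    else (o, t, osz, tsz, doff)

def stripContext (origin_sents target_sents : List (List String)) (max_token_size : Int) :
    Option (List (List String)) × Option (List (List String)) × Int :=
  match stripLoopA (origin_sents.length + 1) origin_sents target_sents true true
      (calTokenSize origin_sents) (calTokenSize target_sents) 0 max_token_size with
  | (o, t, osz, tsz, doff) =>
    if osz > max_token_size ∨ tsz > max_token_size then (none, none, doff)
    else (some o, some t, doff)

def extractDiffContext (origin_sents : List (List String)) (target_sents : List (List String)) (origin_diff : List Int) (target_diff : List Int) (max_tokens : Int) : Option (List (List String)) × Option (List (List String)) × List Int × List Int :=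
  match stripContext origin_sents target_sents 200 with
  | (oc, tc, doff) =>
    if oc ≠ none ∧ tc ≠ none then
      let od := origin_diff.map (fun i => i - doff)
      let td := target_diff.map (fun i => i - doff)
      let td := if td.length > 0 ∧ td.headD 0 = -1 then td.drop 1 else td
      (oc, tc, od, td)
    else (oc, tc, origin_diff, target_diff)

-- ===== PORT B =====
-- two-pointer loop over the original lists: f = sentences trimmed in front, b = in back
def stripLoopB : Nat → List (List String) → List (List String) → Nat → Nat → Nat → Nat → Bool → Bool → Int → Int → Int →
    Nat × Nat × Int × Int × Int
  | 0, _, _, _, _, f, b, _, _, osz, tsz, doff => (f, b, osz, tsz, doff)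
  | fuel + 1, o, t, n, m, f, b, sm, em, osz, tsz, doff =>
    if osz > 200 ∨ tsz > 200 then
      if n - b ≤ f ∨ m - b ≤ f then (f, b, osz, tsz, doff)
      else
        match (if sm && (o.getD f [] == t.getD f []) then
                 let sz : Int := ((o.getD f []).length : Int)
                 (f + 1, sm, osz - sz, tsz - sz, doff + sz)
               else (f, false, osz, tsz, doff)) with
        | (f1, sm1, osz1, tsz1, doff1) =>
          if n - b ≤ f1 ∨ m - b ≤ f1 then (f1, b, osz1, tsz1, doff1)
          else
            match (if em && (o.getD (n - 1 - b) [] == t.getD (m - 1 - b) []) then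
                     let sz : Int := ((o.getD (n - 1 - b) []).length : Int)
                     (b + 1, em, osz1 - sz, tsz1 - sz)
                   else (b, false, osz1, tsz1)) with
          | (b2, em2, osz2, tsz2) =>
            if sm1 = false ∧ em2 = false then (f1, b2, osz2, tsz2, doff1)
            else stripLoopB fuel o t n m f1 b2 sm1 em2 osz2 tsz2 doff1
    else (f, b, osz, tsz, doff)

def extractDiffContext_alt (origin_sents : List (List String)) (target_sents : List (List String)) (origin_diff : List Int) (target_diff : List Int) (max_tokens : Int) : Option (List (List String)) × Option (List (List String)) × List Int × List Int :=
  let n := origin_sents.length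
  let m := target_sents.length
  let osz := (origin_sents.map (fun s => (s.length : Int))).sum
  let tsz := (target_sents.map (fun s => (s.length : Int))).sum
  match stripLoopB (n + 1) origin_sents target_sents n m 0 0 true true osz tsz 0 with
  | (f, b, osz', tsz', doff) =>
    if osz' > 200 ∨ tsz' > 200 then (none, none, origin_diff, target_diff)
    else
      let od := origin_diff.map (fun i => i - doff)
      let td0 := target_diff.map (fun i => i - doff)
      let td := if td0.length > 0 ∧ td0.headD 0 = -1 then td0.drop 1 else td0
      (some ((origin_sents.drop f).take (n - b - f)),
       some ((target_sents.drop f).take (m - b - f)), od, td)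

-- ===== PRECONDITION & SPEC =====
def Spec_extractDiffContext (origin_sents : List (List String)) (target_sents : List (List String)) (origin_diff : List Int) (target_diff : List Int) (max_tokens : Int) (out : Option (List (List String)) × Option (List (List String)) × List Int × List Int) : Prop := out = extractDiffContext_alt origin_sents target_sents origin_diff target_diff max_tokens
instance (origin_sents : List (List String)) (target_sents : List (List String)) (origin_diff : List Int) (target_diff : List Int) (max_tokens : Int) (out : Option (List (List String)) × Option (List (List String)) × List Int × List Int) : Decidable (Spec_extractDiffContext origin_sents target_sents origin_diff target_diff max_tokens out) := by unfold Spec_extractDiffContext; infer_instance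

-- ===== CLAIM (what is proved, stated in full; the proofs are below) =====
def Claim_equal_extractDiffContext : Prop := ∀ (origin_sents : List (List String)) (target_sents : List (List String)) (origin_diff : List Int) (target_diff : List Int) (max_tokens : Int), Dom_extractDiffContext origin_sents target_sents origin_diff target_diff max_tokens → Spec_extractDiffContext origin_sents target_sents origin_diff target_diff max_tokens (extractDiffContext origin_sents target_sents origin_diff target_diff max_tokens)

-- ===== LEMMAS AND PROOFS =====

-- the sublist A's loop is working on, expressed by B's trim counters
def seg (o : List (List String)) (f b : Nat) : List (List String) :=
  (o.drop f).take (o.length - b - f)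

lemma seg_length (o : List (List String)) (f b : Nat) (h : f + b ≤ o.length) :
    (seg o f b).length = o.length - b - f := by
  simp [seg]; omega

lemma seg_headD (o : List (List String)) (f b : Nat) (h : f + b < o.length) :
    (seg o f b).headD [] = o.getD f [] := by
  rw [List.headD_eq_head?_getD, List.head?_eq_getElem?, List.getD_eq_getElem?_getD, seg]
  rw [List.getElem?_take_of_lt (by omega), List.getElem?_drop]
  norm_num

lemma seg_getLastD (o : List (List String)) (f b : Nat) (h : f + b < o.length) :
    (seg o f b).getLastD [] = o.getD (o.length - 1 - b) [] := by
  rw [List.getLastD_eq_getLast?, List.getLast?_eq_getElem?, List.getD_eq_getElem?_getD,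
    seg_length o f b (le_of_lt h), seg]
  rw [List.getElem?_take_of_lt (by omega), List.getElem?_drop]
  congr 2
  omega

lemma seg_drop1 (o : List (List String)) (f b : Nat) :
    (seg o f b).drop 1 = seg o (f + 1) b := by
  rw [seg, seg, List.drop_take, List.drop_drop]
  congr 1

lemma seg_dropLast (o : List (List String)) (f b : Nat) (h : f + b ≤ o.length) :
    (seg o f b).dropLast = seg o f (b + 1) := by
  rw [List.dropLast_eq_take, seg_length o f b h, seg, seg, List.take_take]
  congr 1
  omega

lemma isSameSent_eq_beq (a b : List String) : isSameSent a b = (a == b) := by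
  unfold isSameSent
  split_ifs with h
  · have : a ≠ b := fun e => h (by rw [e])
    simp [this]
  · push_neg at h
    rw [Bool.eq_iff_iff]
    simp only [List.all_eq_true, List.mem_range, beq_iff_eq]
    constructor
    · intro hall
      apply List.ext_getElem h
      intro i h1 h2
      have := hall i h1
      rwa [List.getD_eq_getElem?_getD, List.getD_eq_getElem?_getD,
        List.getElem?_eq_getElem h1, List.getElem?_eq_getElem h2] at this
    · intro e i hi
      subst e
      simp

lemma loop_corr (fuel : Nat) : ∀ (o t : List (List String)) (f b : Nat) (sm em : Bool)
    (osz tsz doff : Int), f + b ≤ o.length → f + b ≤ t.length →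
    stripLoopA fuel (seg o f b) (seg t f b) sm em osz tsz doff 200 =
      (match stripLoopB fuel o t o.length t.length f b sm em osz tsz doff with
       | (f', b', osz', tsz', doff') => (seg o f' b', seg t f' b', osz', tsz', doff')) := by
  induction fuel with
  | zero => intro o t f b sm em osz tsz doff hn hm; simp [stripLoopA, stripLoopB]
  | succ fuel ih =>
    intro o t f b sm em osz tsz doff hn hm
    simp only [stripLoopA, stripLoopB]
    by_cases hw : osz > 200 ∨ tsz > 200
    · rw [if_pos hw, if_pos hw]
      by_cases he : o.length - b ≤ f ∨ t.length - b ≤ f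
      · have heA : (seg o f b).length = 0 ∨ (seg t f b).length = 0 := by
          rw [seg_length o f b hn, seg_length t f b hm]; omega
        rw [if_pos heA, if_pos he]
      · have heA : ¬((seg o f b).length = 0 ∨ (seg t f b).length = 0) := by
          rw [seg_length o f b hn, seg_length t f b hm]; omega
        rw [if_neg heA, if_neg he]
        have hn' : f + b < o.length := by omega
        have hm' : f + b < t.length := by omega
        rw [seg_headD o f b hn', seg_headD t f b hm', isSameSent_eq_beq]
        by_cases hc : (sm && (o.getD f [] == t.getD f [])) = true
        · rw [if_pos hc, if_pos hc]
          dsimp only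
          rw [seg_drop1 o f b, seg_drop1 t f b]
          by_cases he2 : o.length - b <= f + 1 ∨ t.length - b <= f + 1
          · have heA2 : (seg o (f+1) b).length = 0 ∨ (seg t (f+1) b).length = 0 := by
              rw [seg_length o (f+1) b (by omega), seg_length t (f+1) b (by omega)]; omega
            rw [if_pos heA2, if_pos he2]
          · have heA2 : ¬((seg o (f+1) b).length = 0 ∨ (seg t (f+1) b).length = 0) := by
              rw [seg_length o (f+1) b (by omega), seg_length t (f+1) b (by omega)]; omega
            rw [if_neg heA2, if_neg he2]
            have hn2 : f + 1 + b < o.length := by omega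
            have hm2 : f + 1 + b < t.length := by omega
            rw [seg_getLastD o (f+1) b hn2, seg_getLastD t (f+1) b hm2, isSameSent_eq_beq]
            by_cases hc2 : (em && (o.getD (o.length - 1 - b) [] == t.getD (t.length - 1 - b) [])) = true
            · rw [if_pos hc2, if_pos hc2]
              dsimp only
              rw [seg_dropLast o (f+1) b (by omega), seg_dropLast t (f+1) b (by omega)]
              by_cases hl : sm = false ∧ em = false
              · rw [if_pos hl, if_pos hl]
              · rw [if_neg hl, if_neg hl]
                exact ih o t (f+1) (b+1) sm em _ _ _ (by omega) (by omega)
            · rw [if_neg hc2, if_neg hc2]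
              dsimp only
              by_cases hl : sm = false ∧ (false : Bool) = false
              · rw [if_pos hl, if_pos hl]
              · rw [if_neg hl, if_neg hl]
                exact ih o t (f+1) b sm false _ _ _ (by omega) (by omega)
        · rw [if_neg hc, if_neg hc]
          dsimp only
          rw [if_neg heA, if_neg he]
          rw [seg_getLastD o f b hn', seg_getLastD t f b hm', isSameSent_eq_beq]
          by_cases hc2 : (em && (o.getD (o.length - 1 - b) [] == t.getD (t.length - 1 - b) [])) = true
          · rw [if_pos hc2, if_pos hc2]
            dsimp only
            rw [seg_dropLast o f b hn, seg_dropLast t f b hm]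
            by_cases hl : (false : Bool) = false ∧ em = false
            · rw [if_pos hl, if_pos hl]
            · rw [if_neg hl, if_neg hl]
              exact ih o t f (b+1) false em _ _ _ (by omega) (by omega)
          · rw [if_neg hc2, if_neg hc2]
            dsimp only
            rw [if_pos ⟨rfl, rfl⟩, if_pos ⟨rfl, rfl⟩]
    · rw [if_neg hw, if_neg hw]

-- ===== VERDICT =====
theorem extractDiffContext_spec : Claim_equal_extractDiffContext := by
  unfold Claim_equal_extractDiffContext Spec_extractDiffContext
  intro o t od td mx _
  unfold extractDiffContext extractDiffContext_alt stripContext calTokenSize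
  have hsego : seg o 0 0 = o := by simp [seg]
  have hsegt : seg t 0 0 = t := by simp [seg]
  have h := loop_corr (o.length + 1) o t 0 0 true true
      ((o.map (fun sent => (sent.length : Int))).sum)
      ((t.map (fun sent => (sent.length : Int))).sum) 0
      (by omega) (by omega)
  rw [hsego, hsegt] at h
  rw [h]
  dsimp only
  generalize stripLoopB (o.length + 1) o t o.length t.length 0 0 true true
      ((o.map (fun sent => (sent.length : Int))).sum)
      ((t.map (fun sent => (sent.length : Int))).sum) 0 = r
  obtain ⟨f, b, osz', tsz', doff'⟩ := r
  dsimp only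
  by_cases hb : osz' > 200 ∨ tsz' > 200
  · rw [if_pos hb, if_pos hb]
    simp
  · rw [if_neg hb, if_neg hb]
    simp [seg]
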